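-- pv_equiv track=rewrite | github.com/MrBrantCode/unitest_baseline | mut_generate/mist_train_cf/cf_73868/solution.py | below_zero
-- ===== SOURCE A (Python) =====
-- def below_zero(operations, case_insensitive=False):
--     balance = 0
--     low = 0
--
--     for operation in operations:
--         op, value = operation
--         if case_insensitive:
--             op = op.lower()
--         if op == 'deposit':
--             balance += value
--         elif op == 'withdrawal':
--             balance -= value
--         if balance < low:
--             low = balance
--     return low
-- ===== SOURCE B (Python) =====
-- def _delta(op, value, case_insensitive):
--     if case_insensitive:
--         op = op.lower()
--     if op == 'deposit':
--         return value
--     if op == 'withdrawal':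
--         return -value
--     return 0
--
--
-- def below_zero(operations, case_insensitive=False):
--     deltas = [_delta(op, value, case_insensitive) for op, value in operations]
--     prefix = []
--     s = 0
--     for d in deltas:
--         s += d
--         prefix.append(s)
--     return min([0] + prefix)
-- ===== Notes on version B (the rewrite author's own statement) =====
-- stated objective: alternative
-- what changed: Replaces A's single fused accumulator loop (balance and low tracked together) with a map -> prefix-sum scan -> min reduction pipeline over signed deltas.
import Mathlib
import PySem

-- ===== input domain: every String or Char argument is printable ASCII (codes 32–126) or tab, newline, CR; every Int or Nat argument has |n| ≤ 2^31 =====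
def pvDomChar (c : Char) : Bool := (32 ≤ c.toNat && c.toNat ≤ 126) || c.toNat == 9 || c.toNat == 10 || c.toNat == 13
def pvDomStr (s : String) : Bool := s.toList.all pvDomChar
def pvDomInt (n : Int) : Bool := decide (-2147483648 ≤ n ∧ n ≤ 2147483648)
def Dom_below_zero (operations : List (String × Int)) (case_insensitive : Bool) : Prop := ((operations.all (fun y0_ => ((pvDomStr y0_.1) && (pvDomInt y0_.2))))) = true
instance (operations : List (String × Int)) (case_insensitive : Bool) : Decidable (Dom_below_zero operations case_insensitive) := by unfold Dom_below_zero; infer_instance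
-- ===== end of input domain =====

-- B replaces A's fused accumulator loop with a map -> prefix-sum -> min pipeline (alternative decomposition, same O(n) cost).


-- ===== PORT A =====
-- literal transliteration of A: one fold carrying (balance, low)
def below_zero (operations : List (String × Int)) (case_insensitive : Bool) : Int :=
  (operations.foldl
    (fun (st : Int × Int) (operation : String × Int) =>
      let op0 := operation.1
      let value := operation.2
      let op := if case_insensitive then PySem.Str.lower op0 else op0
      let balance := if op == "deposit" then st.1 + value
                     else if op == "withdrawal" then st.1 - value
                     else st.1
      let low := if balance < st.2 then balance else st.2
      (balance, low))
    (0, 0)).2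

-- ===== PORT B =====
-- helper _delta of Source B
def pvDelta (op : String) (value : Int) (case_insensitive : Bool) : Int :=
  let op := if case_insensitive then PySem.Str.lower op else op
  if op == "deposit" then value
  else if op == "withdrawal" then -value
  else 0

-- the prefix-sum loop of Source B (s starts at 0, appends each running sum)
def pvPrefix (s : Int) : List Int → List Int
  | [] => []
  | d :: ds => (s + d) :: pvPrefix (s + d) ds

def below_zero_alt (operations : List (String × Int)) (case_insensitive : Bool) : Int :=
  let deltas := operations.map (fun p => pvDelta p.1 p.2 case_insensitive)
  let pref := pvPrefix 0 deltas
  match PySem.List.min? (0 :: pref) (fun x => x) with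
  | some m => m
  | none => 0

-- ===== PRECONDITION & SPEC =====
def Spec_below_zero (operations : List (String × Int)) (case_insensitive : Bool) (out : Int) : Prop := out = below_zero_alt operations case_insensitive
instance (operations : List (String × Int)) (case_insensitive : Bool) (out : Int) : Decidable (Spec_below_zero operations case_insensitive out) := by unfold Spec_below_zero; infer_instance

-- ===== CLAIM (what is proved, stated in full; the proofs are below) =====
def Claim_equal_below_zero : Prop := ∀ (operations : List (String × Int)) (case_insensitive : Bool), Dom_below_zero operations case_insensitive → Spec_below_zero operations case_insensitive (below_zero operations case_insensitive)

-- ===== LEMMAS AND PROOFS =====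

-- A's fused loop computes the min of `low` and all prefix sums starting from `balance`.
theorem loop_eq (ci : Bool) (ops : List (String × Int)) (b l : Int) :
    (ops.foldl
      (fun (st : Int × Int) (operation : String × Int) =>
        let op0 := operation.1
        let value := operation.2
        let op := if ci then PySem.Str.lower op0 else op0
        let balance := if op == "deposit" then st.1 + value
                       else if op == "withdrawal" then st.1 - value
                       else st.1
        let low := if balance < st.2 then balance else st.2
        (balance, low))
      (b, l)).2
    = (pvPrefix b (ops.map (fun p => pvDelta p.1 p.2 ci))).foldl min l := by
  induction ops generalizing b l with
  | nil => simp [pvPrefix]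
  | cons hd tl ih =>
    simp only [List.foldl_cons, List.map_cons, pvPrefix]
    rw [ih]
    have hb : (if (if ci then PySem.Str.lower hd.1 else hd.1) == "deposit" then b + hd.2
               else if (if ci then PySem.Str.lower hd.1 else hd.1) == "withdrawal" then b - hd.2
               else b) = b + pvDelta hd.1 hd.2 ci := by
      simp only [pvDelta]
      split_ifs <;> omega
    rw [hb]
    congr 1
    rw [Int.min_def]
    split_ifs <;> omega

theorem below_zero_spec_aux (operations : List (String × Int)) (case_insensitive : Bool) :
    below_zero operations case_insensitive = below_zero_alt operations case_insensitive := by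
  unfold below_zero below_zero_alt
  simp only [PySem.List.min?_id_cons]
  exact loop_eq case_insensitive operations 0 0

-- ===== VERDICT (by name: the statement is the Claim_ definition above) =====
theorem below_zero_spec : Claim_equal_below_zero := by
  intro operations case_insensitive _
  exact below_zero_spec_aux operations case_insensitive
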